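-- pv_equiv track=rewrite | github.com/skdreier/religion-politics | script_debris_and_debugging/non_pig_reject_spot_checker.py | make_loose_regex
-- ===== SOURCE A (Python) =====
-- def make_loose_regex(keyword):
--     regex = '(?:'
--     for letter in keyword:
--         if (letter == '[' or letter == '\\' or letter == '^' or letter == '$' or letter == '.'
--                 or letter == '|' or letter == '?' or letter == '*' or letter == '+' or letter == '('
--                 or letter == ')'):
--             regex += '\\'
--         regex += letter
--     regex += ')'
--     return regex
-- ===== SOURCE B (Python) =====
-- import re
--
-- def make_loose_regex(keyword):
--     return '(?:' + re.sub(r'[\[\\^$.|?*+()]', lambda m: '\\' + m.group(0), keyword) + ')'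
-- ===== Notes on version B (the rewrite author's own statement) =====
-- stated objective: idiomatic
-- what changed: Replaced the per-character branching loop and string accumulation by a single re.sub pass over a character class of exactly the 11 specials, wrapped in a non-capturing group.
import Mathlib
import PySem

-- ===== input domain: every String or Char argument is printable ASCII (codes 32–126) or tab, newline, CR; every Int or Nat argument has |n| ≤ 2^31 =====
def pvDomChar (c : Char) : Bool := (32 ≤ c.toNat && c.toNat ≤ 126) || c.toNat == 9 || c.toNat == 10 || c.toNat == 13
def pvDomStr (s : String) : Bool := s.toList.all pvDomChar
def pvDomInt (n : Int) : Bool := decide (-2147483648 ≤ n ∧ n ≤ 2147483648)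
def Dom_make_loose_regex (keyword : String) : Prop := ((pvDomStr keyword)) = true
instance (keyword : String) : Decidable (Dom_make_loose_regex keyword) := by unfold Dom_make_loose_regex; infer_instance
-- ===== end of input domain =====

-- B replaces A's per-character branching loop by one regex-substitution pass
-- (re.sub over a character class of exactly the 11 specials), then wraps in '(?:'…')' — more idiomatic, same cost.

-- ===== PORT A =====
-- strings are handled as their character lists (PySem convention); '+=' is list append
def make_loose_regex (keyword : String) : String :=
  let regex := keyword.toList.foldl (fun regex letter =>
    let regex :=
      if letter == '[' || letter == '\\' || letter == '^' || letter == '$' || letter == '.'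
          || letter == '|' || letter == '?' || letter == '*' || letter == '+' || letter == '('
          || letter == ')' then regex ++ ['\\'] else regex
    regex ++ [letter]) "(?:".toList
  String.ofList (regex ++ [')'])

-- ===== PORT B =====
-- the character class [\[\\^$.|?*+()] of Source B's re.sub
def pvSpecials : List Char := ['[', '\\', '^', '$', '.', '|', '?', '*', '+', '(', ')']

-- re.sub with replacement '\' + match: each special char becomes two chars, others pass through
def pvSubEscape (c : Char) : List Char := if c ∈ pvSpecials then ['\\', c] else [c]

def make_loose_regex_alt (keyword : String) : String :=
  String.ofList ("(?:".toList ++ keyword.toList.flatMap pvSubEscape ++ ")".toList)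

-- ===== PRECONDITION & SPEC =====
def Spec_make_loose_regex (keyword : String) (out : String) : Prop := out = make_loose_regex_alt keyword
instance (keyword : String) (out : String) : Decidable (Spec_make_loose_regex keyword out) := by unfold Spec_make_loose_regex; infer_instance

-- ===== CLAIM (what is proved, stated in full; the proofs are below) =====
def Claim_equal_make_loose_regex : Prop := ∀ (keyword : String), Dom_make_loose_regex keyword → Spec_make_loose_regex keyword (make_loose_regex keyword)

-- ===== LEMMAS AND PROOFS =====

-- A's loop body appends exactly the escape expansion of the letter
theorem pv_step_eq (acc : List Char) (c : Char) :
    (let r :=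
      if c == '[' || c == '\\' || c == '^' || c == '$' || c == '.'
          || c == '|' || c == '?' || c == '*' || c == '+' || c == '('
          || c == ')' then acc ++ ['\\'] else acc
     r ++ [c]) = acc ++ pvSubEscape c := by
  have hb : (c == '[' || c == '\\' || c == '^' || c == '$' || c == '.'
      || c == '|' || c == '?' || c == '*' || c == '+' || c == '('
      || c == ')') = decide (c ∈ pvSpecials) := by
    by_cases h : c ∈ pvSpecials
    · simp only [pvSpecials, List.mem_cons, List.not_mem_nil, or_false] at h
      rcases h with h|h|h|h|h|h|h|h|h|h|h <;> subst h <;> rfl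
    · have h' := h
      simp only [pvSpecials, List.mem_cons, List.not_mem_nil, or_false, not_or] at h'
      obtain ⟨h1,h2,h3,h4,h5,h6,h7,h8,h9,h10,h11⟩ := h'
      simp [h, h1,h2,h3,h4,h5,h6,h7,h8,h9,h10,h11]
  simp only [hb, pvSubEscape]
  by_cases h : c ∈ pvSpecials <;> simp [h]

-- ===== VERDICT (by name: the statement is the Claim_ definition above) =====
theorem make_loose_regex_spec : Claim_equal_make_loose_regex := by
  intro keyword _
  unfold Spec_make_loose_regex make_loose_regex make_loose_regex_alt
  have h : keyword.toList.foldl (fun regex letter =>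
      let regex :=
        if letter == '[' || letter == '\\' || letter == '^' || letter == '$' || letter == '.'
            || letter == '|' || letter == '?' || letter == '*' || letter == '+' || letter == '('
            || letter == ')' then regex ++ ['\\'] else regex
      regex ++ [letter]) "(?:".toList
      = "(?:".toList ++ keyword.toList.flatMap pvSubEscape := by
    have := PySem.List.foldl_append_eq_flatMap pvSubEscape keyword.toList "(?:".toList
    rw [← this]
    exact PySem.List.foldl_congr_mem _ _ _ _ (fun acc c _ => pv_step_eq acc c)
  rw [h]
  simp
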